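-- pv_equiv track=rewrite | github.com/zachjs/sv2v | test/number/gen.py | gen_digits
-- ===== SOURCE A (Python) =====
-- def gen_digits(digits, size):
--     if size <= 0:
--         raise Exception("size must be positive")
--     elif size == 1:
--         for digit in digits:
--             yield digit
--     else:
--         for base in gen_digits(digits, size - 1):
--             for digit in digits:
--                 yield base + digit
-- ===== SOURCE B (Python) =====
-- def gen_digits(digits, size):
--     if size <= 0:
--         raise Exception("size must be positive")
--     n = len(digits)
--     for k in range(n ** size):
--         s = ''
--         rem = k
--         for _ in range(size):
--             s = digits[rem % n] + s
--             rem = rem // n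
--         yield s
-- ===== Notes on version B (the rewrite author's own statement) =====
-- stated objective: alternative
-- what changed: Replaced A's recursion over size (re-yielding the shorter generator and extending it) with direct base-|digits| decoding: enumerate k in range(len(digits)**size) and build the k-th string by repeatedly taking k mod/div len(digits).
import Mathlib
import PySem

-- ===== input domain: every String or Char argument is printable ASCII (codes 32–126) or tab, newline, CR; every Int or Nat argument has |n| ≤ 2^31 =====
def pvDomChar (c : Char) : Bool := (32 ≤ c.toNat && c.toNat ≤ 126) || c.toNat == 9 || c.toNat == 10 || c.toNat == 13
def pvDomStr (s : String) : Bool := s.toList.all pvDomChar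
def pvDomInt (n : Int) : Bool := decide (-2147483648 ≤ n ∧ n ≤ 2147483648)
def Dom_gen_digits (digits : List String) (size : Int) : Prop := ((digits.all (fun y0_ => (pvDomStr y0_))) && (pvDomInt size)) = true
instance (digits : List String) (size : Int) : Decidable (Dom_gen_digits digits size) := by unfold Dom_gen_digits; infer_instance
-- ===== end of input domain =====

-- B enumerates k in range(len(digits)**size) and base-|digits|-decodes each k into its string,
-- instead of A's recursion over size; same output sequence, same cost (objective: alternative).
-- Both Pythons are generators; equivalence is about the materialized sequence of yielded values.

-- ===== PORT A =====
-- recursion on size, exactly as A: size == 1 yields digits; else extend each shorter string by each digit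
def gen_digits (digits : List String) (size : Int) : List String :=
  if _h0 : size ≤ 0 then []   -- Python raises here; excluded by Pre_
  else if size = 1 then digits
  else (gen_digits digits (size - 1)).flatMap (fun base => digits.map (fun digit => base ++ digit))
termination_by size.toNat
decreasing_by omega

-- ===== PORT B =====
-- for each k in range(n ** size), the inner loop prepends digits[rem % n] then divides rem by n;
-- the index rem % n is always in range when the loop body runs (n > 0 then), so pyGetD's default is never used
def gen_digits_alt (digits : List String) (size : Int) : List String :=
  if size ≤ 0 then []   -- Python raises here; excluded by Pre_
  else
    (PySem.List.pyRange 0 ((digits.length : Int) ^ size.toNat) 1).map (fun k =>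
      ((PySem.List.pyRange 0 size 1).foldl
        (fun (st : Int × String) _ =>
          (PySem.Int.floordiv st.1 (digits.length : Int),
           (PySem.List.pyGetD digits (PySem.Int.mod st.1 (digits.length : Int)) "") ++ st.2))
        (k, "")).2)

-- ===== PRECONDITION & SPEC =====
-- Pre_ excludes exactly size ≤ 0, where Python A raises Exception("size must be positive").
def Pre_gen_digits (digits : List String) (size : Int) : Prop := 1 ≤ size
instance (digits : List String) (size : Int) : Decidable (Pre_gen_digits digits size) := by unfold Pre_gen_digits; infer_instance
def pvWitness_gen_digits : List String × Int := (["0", "1"], 2)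
def Spec_gen_digits (digits : List String) (size : Int) (out : List String) : Prop := out = gen_digits_alt digits size
instance (digits : List String) (size : Int) (out : List String) : Decidable (Spec_gen_digits digits size out) := by unfold Spec_gen_digits; infer_instance

-- ===== CLAIM =====
def Claim_equal_gen_digits : Prop := ∀ (digits : List String) (size : Int), Dom_gen_digits digits size → Pre_gen_digits digits size → Spec_gen_digits digits size (gen_digits digits size)

-- ===== LEMMAS AND PROOFS =====

lemma str_nil_append (s : String) : "" ++ s = s := by cases s; rfl

-- the base-n decoding of k into a string of s digit-strings, most significant first
def pvDec (digits : List String) (n : Nat) : Nat → Nat → String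
  | 0, _ => ""
  | s+1, k => pvDec digits n s (k / n) ++ digits.getD (k % n) ""

-- low-digit-first recursion for pvDec
lemma pvDec_succ' (digits : List String) (n : Nat) :
    ∀ (m k : Nat), pvDec digits n (m + 1) k = digits.getD ((k / n ^ m) % n) "" ++ pvDec digits n m k := by
  intro m
  induction m with
  | zero => intro k; simp [pvDec, str_nil_append]
  | succ m ih =>
      intro k
      show pvDec digits n (m + 1) (k / n) ++ digits.getD (k % n) "" = _
      rw [ih (k / n), Nat.div_div_eq_div_mul, ← pow_succ', String.append_assoc]
      rfl

-- enumerating range (m*n) block by block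
lemma range_mul_map {α : Type} (g : Nat → α) (n : Nat) :
    ∀ (m : Nat), (List.range (m * n)).map g
      = (List.range m).flatMap (fun i => (List.range n).map (fun j => g (n * i + j))) := by
  intro m
  induction m with
  | zero => simp
  | succ m ih =>
      rw [Nat.succ_mul, List.range_add, List.map_append, ih, List.range_succ, List.flatMap_append]
      simp [List.map_map, Function.comp_def, Nat.mul_comm]

-- characterization of A: for size = s+1 it is the map of pvDec over range (n^(s+1))
lemma genA_eq_map_dec (digits : List String) :
    ∀ (s : Nat), gen_digits digits ((s : Int) + 1)
      = (List.range (digits.length ^ (s + 1))).map (pvDec digits digits.length (s + 1)) := by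
  intro s
  induction s with
  | zero =>
      rw [gen_digits]
      norm_num
      apply List.ext_getElem
      · simp
      · intro i h1 h2
        have hi : i < digits.length := by simpa using h1
        simp [pvDec, Nat.mod_eq_of_lt hi, List.getD_eq_getElem?_getD, List.getElem?_eq_getElem hi]
  | succ m ih =>
      rw [gen_digits]
      push_cast
      have h1 : ¬ ((m : Int) + 1 + 1 ≤ 0) := by omega
      have h2 : ¬ ((m : Int) + 1 + 1 = 1) := by omega
      have h3 : (m : Int) + 1 + 1 - 1 = (m : Int) + 1 := by omega
      rw [dif_neg h1, if_neg h2, h3, ih, List.flatMap_map,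
        show digits.length ^ (m + 1 + 1) = digits.length ^ (m + 1) * digits.length from pow_succ _ _,
        range_mul_map]
      congr 1
      funext i
      apply List.ext_getElem
      · simp
      · intro j hl hr
        have hj : j < digits.length := by simpa using hl
        have hn : 0 < digits.length := by omega
        simp only [List.getElem_map, List.getElem_range]
        symm
        show pvDec digits digits.length (m + 1 + 1) (digits.length * i + j) = _
        show pvDec digits digits.length (m + 1) ((digits.length * i + j) / digits.length)
            ++ digits.getD ((digits.length * i + j) % digits.length) "" = _
        simp [Nat.mul_add_div hn, Nat.mul_add_mod, Nat.div_eq_of_lt hj, Nat.mod_eq_of_lt hj,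
          List.getD_eq_getElem?_getD, List.getElem?_eq_getElem hj]

-- B's inner fold computes pvDec (and keeps the remaining quotient in the first component)
lemma fold_eq_dec (digits : List String) :
    ∀ (m k : Nat),
      ((PySem.List.pyRange 0 (m : Int) 1).foldl
        (fun (st : Int × String) _ =>
          (PySem.Int.floordiv st.1 (digits.length : Int),
           (PySem.List.pyGetD digits (PySem.Int.mod st.1 (digits.length : Int)) "") ++ st.2))
        ((k : Int), ""))
      = (((k / digits.length ^ m : Nat) : Int), pvDec digits digits.length m k) := by
  intro m
  induction m with
  | zero => intro k; simp [PySem.List.pyRange_one_eq_nil, pvDec]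
  | succ m ih =>
      intro k
      rw [show ((m + 1 : Nat) : Int) = (m : Int) + 1 by push_cast; ring,
        PySem.List.pyRange_one_succ_right (by positivity), List.foldl_append, ih]
      simp only [List.foldl_cons, List.foldl_nil, PySem.Int.floordiv_natCast,
        PySem.Int.mod_natCast, PySem.List.pyGetD_natCast]
      rw [Nat.div_div_eq_div_mul, ← pow_succ, ← pvDec_succ']

-- ===== VERDICT =====
theorem gen_digits_spec : Claim_equal_gen_digits := by
  intro digits size _hdom hpre
  unfold Spec_gen_digits gen_digits_alt
  have hs : ¬ (size ≤ 0) := by unfold Pre_gen_digits at hpre; omega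
  rw [if_neg hs]
  obtain ⟨s, rfl⟩ : ∃ s : Nat, size = ((s + 1 : Nat) : Int) := ⟨(size - 1).toNat, by omega⟩
  have ht : (((s + 1 : Nat)) : Int).toNat = s + 1 := by omega
  have houter : PySem.List.pyRange 0 ((digits.length : Int) ^ (s + 1)) 1
      = (List.range (digits.length ^ (s + 1))).map (fun k : Nat => (k : Int)) := by
    rw [show ((digits.length : Int) ^ (s + 1)) = ((digits.length ^ (s + 1) : Nat) : Int) by
      push_cast; ring, PySem.List.pyRange_one, Int.sub_zero, Int.toNat_natCast]
    simp
  rw [show gen_digits digits ((s + 1 : Nat) : Int) = gen_digits digits ((s : Int) + 1) by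
      norm_num,
    genA_eq_map_dec, ht, houter, List.map_map]
  apply List.map_congr_left
  intro k _
  exact (congrArg Prod.snd (fold_eq_dec digits (s + 1) k)).symm
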